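-- pv_equiv track=rewrite | github.com/lummoxx/AoC24 | day5.py | followsRule
-- ===== SOURCE A (Python) =====
-- def followsRule(pages : list, rule : list) -> bool:
--     first = rule[0]
--     second = rule[1]
--     firsts = [i for i in range(len(pages)) if pages[i] == first]
--     seconds = [i for i in range(len(pages)) if pages[i] == second]
--     for f in firsts:
--         for s in seconds:
--             if f > s:
--                 return False
--     return True
-- ===== SOURCE B (Python) =====
-- def followsRule(pages : list, rule : list) -> bool:
--     first = rule[0]
--     second = rule[1]
--     last_first = -1          # greatest index holding `first`
--     first_second = None      # least index holding `second`
--     for i, p in enumerate(pages):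
--         if p == first:
--             last_first = i
--         if first_second is None and p == second:
--             first_second = i
--     return first_second is None or last_first <= first_second
-- ===== Notes on version B (the rewrite author's own statement) =====
-- stated objective: faster
-- what changed: Replaced the two index-comprehension passes plus nested pairwise index loop (quadratic when values repeat) by a single enumerate pass tracking the last index of rule[0] and the first index of rule[1], finished by one comparison.
import Mathlib
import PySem

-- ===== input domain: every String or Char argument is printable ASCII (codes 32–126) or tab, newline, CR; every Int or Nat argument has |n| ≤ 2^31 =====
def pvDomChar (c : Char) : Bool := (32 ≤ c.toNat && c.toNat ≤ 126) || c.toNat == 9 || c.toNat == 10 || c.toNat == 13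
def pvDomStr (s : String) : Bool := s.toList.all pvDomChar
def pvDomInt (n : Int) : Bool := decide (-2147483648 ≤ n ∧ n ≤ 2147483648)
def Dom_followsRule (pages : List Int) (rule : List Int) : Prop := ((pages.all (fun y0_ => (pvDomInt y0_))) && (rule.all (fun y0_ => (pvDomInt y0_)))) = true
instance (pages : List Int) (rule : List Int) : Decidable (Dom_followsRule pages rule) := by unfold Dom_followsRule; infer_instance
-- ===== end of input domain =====

-- B replaces A's two index comprehensions and nested pairwise loop by one enumerate
-- pass tracking the last index of rule[0] and the first index of rule[1] (objective: faster).

-- ===== PORT A =====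
-- A's body after first = rule[0], second = rule[1]: two index comprehensions over
-- range(len(pages)), then the nested loop 'if f > s: return False', finally 'return True'.
def aCheck (pages : List Int) (first second : Int) : Bool :=
  let firsts := (PySem.List.pyRange 0 pages.length 1).filter
    (fun i => PySem.List.pyGetD pages i 0 == first)
  let seconds := (PySem.List.pyRange 0 pages.length 1).filter
    (fun i => PySem.List.pyGetD pages i 0 == second)
  !(firsts.any fun f => seconds.any fun s => decide (s < f))

def followsRule (pages : List Int) (rule : List Int) : Bool :=
  match PySem.List.pyGet? rule 0, PySem.List.pyGet? rule 1 with
  | some first, some second => aCheck pages first second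
  | _, _ => false  -- rule[0]/rule[1] raises IndexError; excluded by Pre_

-- ===== PORT B =====
-- B's single pass: fold over enumerate(pages) carrying (last_first, first_second).
def bStep (first second : Int) (st : Int × Option Int) (p : Int × Int) : Int × Option Int :=
  (if p.2 == first then p.1 else st.1,
   if st.2.isNone && p.2 == second then some p.1 else st.2)

def bCheck (pages : List Int) (first second : Int) : Bool :=
  let st := (PySem.List.enumerate pages).foldl (bStep first second) (-1, none)
  match st.2 with
  | none => true
  | some j => decide (st.1 ≤ j)

def followsRule_alt (pages : List Int) (rule : List Int) : Bool :=
  match PySem.List.pyGet? rule 0 with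
  | none => false  -- IndexError region, excluded by Pre_
  | some first =>
    match PySem.List.pyGet? rule 1 with
    | none => false  -- IndexError region, excluded by Pre_
    | some second => bCheck pages first second

-- ===== PRECONDITION & SPEC =====
-- A raises IndexError on rule[0]/rule[1] when rule has fewer than two elements.
def Pre_followsRule (pages : List Int) (rule : List Int) : Prop := 2 ≤ rule.length
instance (pages : List Int) (rule : List Int) : Decidable (Pre_followsRule pages rule) := by
  unfold Pre_followsRule; infer_instance

def pvWitness_followsRule : List Int × List Int := ([3, 1, 2, 3], [1, 3])

def Spec_followsRule (pages : List Int) (rule : List Int) (out : Bool) : Prop := out = followsRule_alt pages rule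
instance (pages : List Int) (rule : List Int) (out : Bool) : Decidable (Spec_followsRule pages rule out) := by unfold Spec_followsRule; infer_instance

-- ===== CLAIM (what is proved, stated in full; the proofs are below) =====
def Claim_equal_followsRule : Prop := ∀ (pages : List Int) (rule : List Int), Dom_followsRule pages rule → Pre_followsRule pages rule → Spec_followsRule pages rule (followsRule pages rule)

-- ===== LEMMAS AND PROOFS =====

theorem mem_idxList (pages : List Int) (v x : Int) :
    (x ∈ (PySem.List.pyRange 0 pages.length 1).filter
        (fun k => PySem.List.pyGetD pages k 0 == v)) ↔
      ∃ (i : Nat) (hi : i < pages.length), x = (i : Int) ∧ pages[i] = v := by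
  simp only [List.mem_filter, PySem.List.mem_pyRange_one, beq_iff_eq]
  constructor
  · rintro ⟨⟨h0, hn⟩, hv⟩
    obtain ⟨i, rfl⟩ : ∃ i : Nat, x = (i : Int) := ⟨x.toNat, by omega⟩
    have hi : i < pages.length := by omega
    refine ⟨i, hi, rfl, ?_⟩
    rw [PySem.List.pyGetD_natCast] at hv
    rwa [List.getD_eq_getElem?_getD, List.getElem?_eq_getElem hi, Option.getD_some] at hv
  · rintro ⟨i, hi, rfl, hv⟩
    refine ⟨⟨by omega, by omega⟩, ?_⟩
    rw [PySem.List.pyGetD_natCast, List.getD_eq_getElem?_getD, List.getElem?_eq_getElem hi,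
      Option.getD_some]
    exact hv

theorem aCheck_iff (pages : List Int) (f s : Int) :
    aCheck pages f s = true ↔
      ∀ (i j : Nat) (hi : i < pages.length) (hj : j < pages.length),
        pages[i] = f → pages[j] = s → i ≤ j := by
  unfold aCheck
  simp only [Bool.not_eq_true', List.any_eq_false, List.any_eq_true, decide_eq_true_eq,
    not_exists, not_and, not_lt, mem_idxList]
  constructor
  · intro h i j hi hj hf hs
    have := h (i : Int) ⟨i, hi, rfl, hf⟩ (j : Int) ⟨j, hj, rfl, hs⟩
    omega
  · rintro h x ⟨i, hi, rfl, hf⟩ y ⟨j, hj, rfl, hs⟩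
    have := h i j hi hj hf hs
    omega

theorem state_char (f s : Int) (pages : List Int) :
    ((((PySem.List.enumerate pages).foldl (bStep f s) (-1, none)).1 = -1 ∧
        ∀ (i : Nat) (hi : i < pages.length), pages[i] ≠ f) ∨
      (∃ (i : Nat) (hi : i < pages.length), pages[i] = f ∧
        (((PySem.List.enumerate pages).foldl (bStep f s) (-1, none)).1 = (i : Int)) ∧
        ∀ (j : Nat) (hj : j < pages.length), pages[j] = f → j ≤ i)) ∧
    ((((PySem.List.enumerate pages).foldl (bStep f s) (-1, none)).2 = none ∧
        ∀ (j : Nat) (hj : j < pages.length), pages[j] ≠ s) ∨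
      (∃ (j : Nat) (hj : j < pages.length), pages[j] = s ∧
        (((PySem.List.enumerate pages).foldl (bStep f s) (-1, none)).2 = some (j : Int)) ∧
        ∀ (i : Nat) (hi : i < pages.length), pages[i] = s → j ≤ i)) := by
  induction pages using List.reverseRecOn with
  | nil => exact ⟨Or.inl ⟨rfl, by simp⟩, Or.inl ⟨rfl, by simp⟩⟩
  | append_singleton xs x ih =>
    have hlen : (xs ++ [x]).length = xs.length + 1 := by simp
    have hget : ∀ (i : Nat) (hi : i < xs.length), (xs ++ [x])[i]'(by simp; omega) = xs[i] := by
      intro i hi; rw [List.getElem_append_left hi]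
    have hgetl : (xs ++ [x])[xs.length]'(by simp) = x := by
      simp
    rw [PySem.List.enumerate_append] at *
    simp only [PySem.List.enumerate_cons, PySem.List.enumerate_nil, List.foldl_append,
      List.foldl_cons, List.foldl_nil, zero_add] at *
    set st := (PySem.List.enumerate xs).foldl (bStep f s) (-1, none) with hst
    constructor
    · -- first component
      by_cases hxf : x = f
      · refine Or.inr ⟨xs.length, by simp, by simpa using hxf, ?_, by intro j hj _; omega⟩
        simp [bStep, hxf]
      · rcases ih.1 with ⟨he, hno⟩ | ⟨i0, hi0, hif, heq, hmax⟩
        · refine Or.inl ⟨?_, ?_⟩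
          · simp [bStep, hxf, he]
          · intro i hi
            rw [hlen] at hi
            rcases Nat.lt_or_ge i xs.length with h | h
            · rw [hget i h]; exact hno i h
            · have : i = xs.length := by omega
              subst this; rw [hgetl]; exact hxf
        · refine Or.inr ⟨i0, by omega, by rw [hget i0 hi0]; exact hif, ?_, ?_⟩
          · simp [bStep, hxf, heq]
          · intro j hj hjf
            rw [hlen] at hj
            rcases Nat.lt_or_ge j xs.length with h | h
            · rw [hget j h] at hjf; exact hmax j h hjf
            · have : j = xs.length := by omega
              subst this; rw [hgetl] at hjf; exact absurd hjf hxf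
    · -- second component
      rcases ih.2 with ⟨he, hno⟩ | ⟨j0, hj0, hjs, heq, hmin⟩
      · by_cases hxs : x = s
        · refine Or.inr ⟨xs.length, by simp, by simpa using hxs, ?_, ?_⟩
          · simp [bStep, he, hxs]
          · intro i hi his
            rw [hlen] at hi
            rcases Nat.lt_or_ge i xs.length with h | h
            · rw [hget i h] at his; exact absurd his (hno i h)
            · omega
        · refine Or.inl ⟨?_, ?_⟩
          · simp [bStep, he, hxs]
          · intro j hj
            rw [hlen] at hj
            rcases Nat.lt_or_ge j xs.length with h | h
            · rw [hget j h]; exact hno j h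
            · have : j = xs.length := by omega
              subst this; rw [hgetl]; exact hxs
      · refine Or.inr ⟨j0, by omega, by rw [hget j0 hj0]; exact hjs, ?_, ?_⟩
        · simp [bStep, heq]
        · intro i hi his
          rw [hlen] at hi
          rcases Nat.lt_or_ge i xs.length with h | h
          · rw [hget i h] at his; exact hmin i h his
          · omega

theorem bCheck_iff (pages : List Int) (f s : Int) :
    bCheck pages f s = true ↔
      ∀ (i j : Nat) (hi : i < pages.length) (hj : j < pages.length),
        pages[i] = f → pages[j] = s → i ≤ j := by
  obtain ⟨h1, h2⟩ := state_char f s pages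
  unfold bCheck
  rcases h2 with ⟨hnone, hno⟩ | ⟨j0, hj0, hjs, heq, hmin⟩
  · simp only [hnone]
    constructor
    · intro _ i j hi hj hif hjs; exact absurd hjs (hno j hj)
    · intro _; trivial
  · simp only [heq, decide_eq_true_eq]
    rcases h1 with ⟨hneg, hnof⟩ | ⟨i0, hi0, hif, heq1, hmax⟩
    · simp only [hneg]
      constructor
      · intro _ i j hi hj hf hs'; exact absurd hf (hnof i hi)
      · intro _; omega
    · simp only [heq1]
      constructor
      · intro h i j hi hj hf hs'
        have hA := hmax i hi hf
        have hB := hmin j hj hs'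
        omega
      · intro h
        have := h i0 j0 hi0 hj0 hif hjs
        omega

-- ===== VERDICT (by name: the statement is the Claim_ definition above) =====
theorem followsRule_spec : Claim_equal_followsRule := by
  intro pages rule _ hpre
  unfold Spec_followsRule followsRule followsRule_alt
  unfold Pre_followsRule at hpre
  cases h0 : PySem.List.pyGet? rule 0 with
  | none =>
      have hn := (PySem.List.pyGet?_eq_none_iff rule 0).mp h0
      exact absurd (by simp [PySem.Raise.InRange]; omega) hn
  | some f =>
      cases h1 : PySem.List.pyGet? rule 1 with
      | none =>
          have hn := (PySem.List.pyGet?_eq_none_iff rule 1).mp h1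
          exact absurd (by simp [PySem.Raise.InRange]; omega) hn
      | some s =>
          have hiff := (aCheck_iff pages f s).trans (bCheck_iff pages f s).symm
          cases ha : aCheck pages f s <;> cases hb : bCheck pages f s <;> simp_all
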